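-- pv_equiv track=rewrite | github.com/vallarasuk/LeetCode | solutions/2832. Maximal Range That Each Element Is Maximum in It/2832.py | maximumLengthOfRanges
-- ===== SOURCE A (Python) =====
-- from typing import List
--
-- def maximumLengthOfRanges(nums: List[int]) -> List[int]:
--   ans = [0] * len(nums)
--   stack = []  # decreasing stack
--
--   for i in range(len(nums) + 1):
--     while stack and (i == len(nums) or nums[stack[-1]] < nums[i]):
--       index = stack.pop()
--       left = stack[-1] if stack else -1
--       ans[index] = i - left - 1
--     stack.append(i)
--
--   return ans
-- ===== SOURCE B (Python) =====
-- from typing import List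
--
-- def maximumLengthOfRanges(nums: List[int]) -> List[int]:
--   # Per element, scan left for the nearest value >= nums[i] and right for the
--   # nearest value strictly > nums[i]; the answer is the gap between them.
--   n = len(nums)
--   res = []
--   for i in range(n):
--     l = i - 1
--     while l >= 0 and nums[l] < nums[i]:
--       l -= 1
--     r = i + 1
--     while r < n and nums[r] <= nums[i]:
--       r += 1
--     res.append(r - l - 1)
--   return res
-- ===== Notes on version B (the rewrite author's own statement) =====
-- stated objective: simpler
-- what changed: Replaced A's single monotonic-stack sweep (which computes answers lazily at pop time) by an independent per-element pair of direct scans: nearest value >= nums[i] to the left, nearest value strictly > nums[i] to the right, answer = gap between them.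
import Mathlib
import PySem

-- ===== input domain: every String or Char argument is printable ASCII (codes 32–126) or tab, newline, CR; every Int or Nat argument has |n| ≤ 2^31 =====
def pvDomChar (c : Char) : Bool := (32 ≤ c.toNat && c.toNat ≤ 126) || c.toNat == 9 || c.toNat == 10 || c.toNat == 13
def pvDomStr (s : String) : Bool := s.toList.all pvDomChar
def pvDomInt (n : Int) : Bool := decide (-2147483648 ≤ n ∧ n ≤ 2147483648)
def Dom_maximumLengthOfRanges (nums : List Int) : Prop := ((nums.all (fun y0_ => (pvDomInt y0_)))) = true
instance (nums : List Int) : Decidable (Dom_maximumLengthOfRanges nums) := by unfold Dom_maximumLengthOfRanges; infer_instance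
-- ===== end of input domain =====

-- B replaces A's single monotonic-stack pass by an independent per-element two-sided
-- scan (nearest ≥ on the left, nearest strictly > on the right); objective: simpler,
-- no speed claim (B is O(n^2) worst case).

-- ===== PORT A =====
-- the inner `while stack and (i == len(nums) or nums[stack[-1]] < nums[i])` loop;
-- recursion on the stack (each iteration pops one element)
def popA (nums : List Int) (i : Nat) : List Nat → List Int → List Nat × List Int
  | [], ans => ([], ans)
  | t :: rest, ans =>
    if i = nums.length ∨ nums.getD t 0 < nums.getD i 0 then
      -- left = stack[-1] if stack else -1
      let left : Int := match rest with | [] => -1 | l :: _ => (l : Int)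
      popA nums i rest (ans.set t ((i : Int) - left - 1))
    else (t :: rest, ans)

def maximumLengthOfRanges (nums : List Int) : List Int :=
  ((List.range (nums.length + 1)).foldl
    (fun st i =>
      let r := popA nums i st.1 st.2
      (i :: r.1, r.2))
    ([], List.replicate nums.length 0)).2

-- ===== PORT B =====
-- `l = i - 1; while l >= 0 and nums[l] < nums[i]: l -= 1`; argument is l+1 (0 encodes l = -1)
def lscanB (nums : List Int) (x : Int) : Nat → Int
  | 0 => -1
  | k + 1 => if nums.getD k 0 < x then lscanB nums x k else (k : Int)

-- `r = i + 1; while r < n and nums[r] <= nums[i]: r += 1`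
def rscanB (nums : List Int) (x : Int) (r : Nat) : Nat :=
  if h : r < nums.length then
    (if nums.getD r 0 ≤ x then rscanB nums x (r + 1) else r)
  else r
termination_by nums.length - r
decreasing_by omega

def maximumLengthOfRanges_alt (nums : List Int) : List Int :=
  (List.range nums.length).map (fun i =>
    ((rscanB nums (nums.getD i 0) (i + 1) : Int)) - lscanB nums (nums.getD i 0) i - 1)

-- ===== PRECONDITION & SPEC =====
def Spec_maximumLengthOfRanges (nums : List Int) (out : List Int) : Prop := out = maximumLengthOfRanges_alt nums
instance (nums : List Int) (out : List Int) : Decidable (Spec_maximumLengthOfRanges nums out) := by unfold Spec_maximumLengthOfRanges; infer_instance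

-- ===== CLAIM (what is proved, stated in full; the proofs are below) =====
def Claim_equal_maximumLengthOfRanges : Prop := ∀ (nums : List Int), Dom_maximumLengthOfRanges nums → Spec_maximumLengthOfRanges nums (maximumLengthOfRanges nums)

-- ===== LEMMAS AND PROOFS =====

theorem lscan_lt (nums : List Int) (x : Int) (m : Nat) : lscanB nums x m < (m : Int) := by
  induction m with
  | zero => simp [lscanB]
  | succ k ih =>
    simp only [lscanB]
    split
    · omega
    · omega

theorem lscan_ge (nums : List Int) (x : Int) (m : Nat) : -1 ≤ lscanB nums x m := by
  induction m with
  | zero => simp [lscanB]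
  | succ k ih =>
    simp only [lscanB]
    split
    · omega
    · omega

theorem lscan_cases (nums : List Int) (x : Int) (m : Nat) :
    lscanB nums x m = -1 ∨
      ∃ j : Nat, lscanB nums x m = (j : Int) ∧ j < m ∧ x ≤ nums.getD j 0 := by
  induction m with
  | zero => left; simp [lscanB]
  | succ k ih =>
    simp only [lscanB]
    split
    · rcases ih with h | ⟨j, h1, h2, h3⟩
      · left; exact h
      · right; exact ⟨j, h1, by omega, h3⟩
    · right; exact ⟨k, rfl, by omega, by omega⟩

theorem lscan_between (nums : List Int) (x : Int) (m : Nat) :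
    ∀ k : Nat, lscanB nums x m < (k : Int) → k < m → nums.getD k 0 < x := by
  induction m with
  | zero => intro k _ hk; omega
  | succ p ih =>
    intro k hk1 hk2
    simp only [lscanB] at hk1
    by_cases hv : nums.getD p 0 < x
    · simp only [if_pos hv] at hk1
      by_cases hkp : k = p
      · exact hkp ▸ hv
      · exact ih k hk1 (by omega)
    · simp only [if_neg hv] at hk1
      omega

theorem lscan_eq_neg (nums : List Int) (x : Int) (m : Nat)
    (h : ∀ k, k < m → nums.getD k 0 < x) : lscanB nums x m = -1 := by
  induction m with
  | zero => simp [lscanB]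
  | succ k ih =>
    simp only [lscanB, if_pos (h k (by omega))]
    exact ih (fun k' hk' => h k' (by omega))

theorem lscan_eq (nums : List Int) (x : Int) (m j : Nat) (hj : j < m)
    (hv : x ≤ nums.getD j 0) (h : ∀ k, j < k → k < m → nums.getD k 0 < x) :
    lscanB nums x m = (j : Int) := by
  induction m with
  | zero => omega
  | succ k ih =>
    by_cases hkj : k = j
    · subst hkj; simp only [lscanB]; rw [if_neg (by omega)]
    · simp only [lscanB, if_pos (h k (by omega) (by omega))]
      exact ih (by omega) (fun k' h1 h2 => h k' h1 (by omega))

theorem rscan_spec (nums : List Int) (x : Int) (r : Nat) (hr : r ≤ nums.length) :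
    r ≤ rscanB nums x r ∧ rscanB nums x r ≤ nums.length ∧
      (∀ k : Nat, r ≤ k → k < rscanB nums x r → nums.getD k 0 ≤ x) ∧
      (rscanB nums x r = nums.length ∨ x < nums.getD (rscanB nums x r) 0) := by
  induction r using rscanB.induct nums x with
  | case1 r h hv ih =>
    rw [rscanB, dif_pos h, if_pos hv]
    obtain ⟨h1, h2, h3, h4⟩ := ih (by omega)
    refine ⟨by omega, h2, ?_, h4⟩
    intro k hk1 hk2
    by_cases hkr : k = r
    · exact hkr ▸ hv
    · exact h3 k (by omega) hk2
  | case2 r h hv =>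
    rw [rscanB, dif_pos h, if_neg hv]
    exact ⟨le_refl _, by omega, fun k h1 h2 => by omega, Or.inr (by omega)⟩
  | case3 r h =>
    rw [rscanB, dif_neg h]
    exact ⟨le_refl _, hr, fun k h1 h2 => by omega, Or.inl (by omega)⟩

theorem rscan_eq (nums : List Int) (x : Int) (r m : Nat) (h1 : r ≤ m) (h2 : m ≤ nums.length)
    (h3 : ∀ k : Nat, r ≤ k → k < m → nums.getD k 0 ≤ x)
    (h4 : m = nums.length ∨ x < nums.getD m 0) :
    rscanB nums x r = m := by
  induction r using rscanB.induct nums x with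
  | case1 r h hv ih =>
    rw [rscanB, dif_pos h, if_pos hv]
    by_cases hrm : r = m
    · subst hrm
      rcases h4 with h4 | h4
      · omega
      · omega
    · exact ih (by omega) (fun k hk1 hk2 => h3 k (by omega) hk2)
  | case2 r h hv =>
    rw [rscanB, dif_pos h, if_neg hv]
    by_cases hrm : r = m
    · omega
    · exact absurd (h3 r (le_refl _) (by omega)) hv
  | case3 r h =>
    rw [rscanB, dif_neg h]
    omega

-- the value B computes for index m (also the value A stores when it pops m)
def outV (nums : List Int) (m : Nat) : Int :=
  ((rscanB nums (nums.getD m 0) (m + 1) : Int)) - lscanB nums (nums.getD m 0) m - 1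

-- A's stack after processing index j: j, then the nearest ≥-element to its left, and so on
def linkChain (nums : List Int) (j : Nat) : List Nat :=
  j :: (if _h : lscanB nums (nums.getD j 0) j = -1 then []
        else linkChain nums (lscanB nums (nums.getD j 0) j).toNat)
termination_by j
decreasing_by
  have h1 := lscan_lt nums (nums.getD j 0) j
  have h2 := lscan_ge nums (nums.getD j 0) j
  omega

theorem chain_mem_le (nums : List Int) (j : Nat) : ∀ t ∈ linkChain nums j, t ≤ j := by
  induction j using Nat.strong_induction_on with
  | _ j ih =>
    intro t ht
    rw [linkChain] at ht
    rcases List.mem_cons.mp ht with h | h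
    · omega
    · split at h
      · simp at h
      · rename_i hne
        have h1 := lscan_lt nums (nums.getD j 0) j
        have h2 := lscan_ge nums (nums.getD j 0) j
        have := ih (lscanB nums (nums.getD j 0) j).toNat (by omega) t h
        omega

-- every element of the chain dominates everything after it up to j
theorem chain_prop (nums : List Int) (j : Nat) :
    ∀ t ∈ linkChain nums j, ∀ k : Nat, t < k → k ≤ j → nums.getD k 0 ≤ nums.getD t 0 := by
  induction j using Nat.strong_induction_on with
  | _ j ih =>
    intro t ht k hk1 hk2
    rw [linkChain] at ht
    rcases List.mem_cons.mp ht with h | h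
    · omega
    · split at h
      · simp at h
      · rename_i hne
        have h1 := lscan_lt nums (nums.getD j 0) j
        have h2 := lscan_ge nums (nums.getD j 0) j
        set j1 := (lscanB nums (nums.getD j 0) j).toNat with hj1
        have hj1e : lscanB nums (nums.getD j 0) j = (j1 : Int) := by omega
        rcases lscan_cases nums (nums.getD j 0) j with hc | ⟨j', hc1, hc2, hc3⟩
        · omega
        · have hj' : j' = j1 := by omega
          subst hj'
          -- nums.getD j1 0 ≥ nums.getD j 0, and everything in (j1, j) is < nums.getD j 0
          have htj1 : t ≤ j1 := chain_mem_le nums j1 t h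
          by_cases hkj1 : k ≤ j1
          · exact ih j1 (by omega) t h k hk1 hkj1
          · -- k ∈ (j1, j]: nums.getD k 0 ≤ nums.getD j1 0 ≤ nums.getD t 0 (t in chain j1)
            have hkv : nums.getD k 0 ≤ nums.getD j1 0 := by
              by_cases hkj : k = j
              · exact hkj ▸ hc3
              · have := lscan_between nums (nums.getD j 0) j k (by omega) (by omega)
                omega
            by_cases htj : t = j1
            · exact htj ▸ hkv
            · have := ih j1 (by omega) t h j1 (by omega) (le_refl _)
              omega

theorem chain_val_mono (nums : List Int) (j : Nat) :
    ∀ t ∈ linkChain nums j, nums.getD j 0 ≤ nums.getD t 0 := by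
  intro t ht
  by_cases htj : t = j
  · exact htj ▸ le_refl _
  · have h1 := chain_mem_le nums j t ht
    exact chain_prop nums j t ht j (by omega) (le_refl _)

theorem chain_mem_of (nums : List Int) (j : Nat) :
    ∀ m : Nat, m ≤ j → (∀ k : Nat, m < k → k ≤ j → nums.getD k 0 ≤ nums.getD m 0) →
      m ∈ linkChain nums j := by
  induction j using Nat.strong_induction_on with
  | _ j ih =>
    intro m hm hdom
    rw [linkChain]
    by_cases hmj : m = j
    · exact hmj ▸ List.mem_cons_self
    · refine List.mem_cons.mpr (Or.inr ?_)
      have hvm : nums.getD j 0 ≤ nums.getD m 0 := hdom j (by omega) (le_refl _)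
      have h1 := lscan_lt nums (nums.getD j 0) j
      have h2 := lscan_ge nums (nums.getD j 0) j
      rcases lscan_cases nums (nums.getD j 0) j with hc | ⟨j1, hc1, hc2, hc3⟩
      · -- impossible: m < j has value ≥ nums[j]
        have := lscan_between nums (nums.getD j 0) j m (by omega) (by omega)
        omega
      · rw [hc1]
        have hmj1 : m ≤ j1 := by
          by_contra hcon
          have := lscan_between nums (nums.getD j 0) j m (by omega) (by omega)
          omega
        split
        · omega
        · have : ((j1 : Int)).toNat = j1 := by omega
          rw [hc1] at *
          simp only [Int.toNat_natCast]
          exact ih j1 (by omega) m hmj1 (fun k hk1 hk2 => hdom k hk1 (by omega))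

theorem getD_set_self (l : List Int) (i : Nat) (a : Int) (h : i < l.length) :
    (l.set i a).getD i 0 = a := by
  simp [List.getD_eq_getElem?_getD, h]

theorem getD_set_ne (l : List Int) (i m : Nat) (a : Int) (h : m ≠ i) :
    (l.set i a).getD m 0 = l.getD m 0 := by
  simp [List.getD_eq_getElem?_getD, List.getElem?_set_ne (Ne.symm h)]

theorem getD_replicate (n m : Nat) : (List.replicate n (0 : Int)).getD m 0 = 0 := by
  simp [List.getD_eq_getElem?_getD]

-- everything strictly between a survivor t' and the current index is < x
theorem gap_lt (nums : List Int) (i : Nat) (x : Int) (t' : Int)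
    (hpop : ∀ t ∈ linkChain nums i, t' < (t : Int) → nums.getD t 0 < x) :
    ∀ d k : Nat, i - k ≤ d → t' < (k : Int) → k ≤ i → nums.getD k 0 < x := by
  intro d
  induction d with
  | zero =>
    intro k h1 h2 h3
    have hk : k = i := by omega
    subst hk
    exact hpop k (by rw [linkChain]; exact List.mem_cons_self) h2
  | succ d ih =>
    intro k h1 h2 h3
    by_cases hm : k ∈ linkChain nums i
    · exact hpop k hm h2
    · have hno : ¬(k ≤ i ∧ ∀ m : Nat, k < m → m ≤ i → nums.getD m 0 ≤ nums.getD k 0) :=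
        fun ⟨a, b⟩ => hm (chain_mem_of nums i k a b)
      push Not at hno
      obtain ⟨m, hm1, hm2, hm3⟩ := hno h3
      have := ih m (by omega) (by omega) hm2
      omega

-- running A's inner while loop on a link chain: which elements pop, what gets written
theorem pop_run (nums : List Int) (i' : Nat) (hi : i' ≤ nums.length) :
    ∀ j, ∀ ans : List Int, ans.length = nums.length →
    (∀ t ∈ linkChain nums j, t < i' ∧
        ∀ k : Nat, t < k → k < i' → nums.getD k 0 ≤ nums.getD t 0) →
    ∃ s' ans',
      popA nums i' (linkChain nums j) ans = (s', ans') ∧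
      ans'.length = nums.length ∧
      (∀ m : Nat, ans'.getD m 0 =
        if m ∈ linkChain nums j ∧ (i' = nums.length ∨ nums.getD m 0 < nums.getD i' 0)
        then outV nums m else ans.getD m 0) ∧
      ((s' = [] ∧ ∀ t ∈ linkChain nums j,
          (i' = nums.length ∨ nums.getD t 0 < nums.getD i' 0)) ∨
       (∃ t', s' = linkChain nums t' ∧ t' ∈ linkChain nums j ∧
          ¬(i' = nums.length ∨ nums.getD t' 0 < nums.getD i' 0) ∧
          ∀ t ∈ linkChain nums j, t' < t →
            (i' = nums.length ∨ nums.getD t 0 < nums.getD i' 0))) := by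
  intro j
  induction j using Nat.strong_induction_on with
  | _ j ih =>
    intro ans hlen Hmem
    have hjmem : j ∈ linkChain nums j := by rw [linkChain]; exact List.mem_cons_self
    have hji : j < i' := (Hmem j hjmem).1
    by_cases hC : i' = nums.length ∨ nums.getD j 0 < nums.getD i' 0
    · -- j pops
      have hRj : rscanB nums (nums.getD j 0) (j + 1) = i' :=
        rscan_eq nums (nums.getD j 0) (j + 1) i' (by omega) hi
          (fun k hk1 hk2 => (Hmem j hjmem).2 k (by omega) hk2) hC
      have h1 := lscan_lt nums (nums.getD j 0) j
      have h2 := lscan_ge nums (nums.getD j 0) j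
      have hvout : (i' : Int) - lscanB nums (nums.getD j 0) j - 1 = outV nums j := by
        rw [outV, hRj]
      by_cases hneg : lscanB nums (nums.getD j 0) j = -1
      · -- tail empty: whole (singleton) chain pops
        have hchain : linkChain nums j = [j] := by rw [linkChain]; rw [dif_pos hneg]
        refine ⟨[], ans.set j ((i' : Int) - (-1) - 1), ?_, ?_, ?_, ?_⟩
        · rw [hchain]
          simp only [popA, if_pos hC]
        · simp [hlen]
        · intro m
          rw [hchain]
          by_cases hmj : m = j
          · subst hmj
            rw [getD_set_self ans m _ (by omega)]
            simp only [List.mem_singleton, true_and, if_pos hC, ← hvout, hneg]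
          · rw [getD_set_ne ans j m _ hmj]
            simp [hmj]
        · left
          refine ⟨rfl, ?_⟩
          rw [hchain]
          intro t ht
          rcases List.mem_singleton.mp ht with rfl
          exact hC
      · -- tail = linkChain j1
        set j1 : Nat := (lscanB nums (nums.getD j 0) j).toNat with hj1def
        have hj1e : lscanB nums (nums.getD j 0) j = (j1 : Int) := by omega
        have hj1j : j1 < j := by omega
        have hchain : linkChain nums j = j :: linkChain nums j1 := by
          rw [linkChain]; rw [dif_neg hneg]
        have hsub : ∀ t ∈ linkChain nums j1, t ∈ linkChain nums j := by
          intro t ht; rw [hchain]; exact List.mem_cons_of_mem _ ht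
        have hnotin : j ∉ linkChain nums j1 := by
          intro hcon
          have := chain_mem_le nums j1 j hcon
          omega
        set v : Int := (i' : Int) - (j1 : Int) - 1 with hvdef
        have hv : v = outV nums j := by rw [← hvout, hj1e]
        obtain ⟨s', ans', hpop, hlen', hans', hstack⟩ :=
          ih j1 hj1j (ans.set j v) (by simp [hlen])
            (fun t ht => Hmem t (hsub t ht))
        refine ⟨s', ans', ?_, hlen', ?_, ?_⟩
        · rw [hchain]
          simp only [popA, if_pos hC]
          have hchain1 : linkChain nums j1 = j1 :: (if h : lscanB nums (nums.getD j1 0) j1 = -1 then []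
              else linkChain nums (lscanB nums (nums.getD j1 0) j1).toNat) := by
            rw [linkChain]
          rw [hchain1] at hpop ⊢
          exact hpop
        · intro m
          rw [hans' m, hchain]
          by_cases hmj : m = j
          · subst hmj
            rw [if_neg (fun h => hnotin h.1)]
            rw [getD_set_self ans m v (by omega)]
            simp only [List.mem_cons, true_or, true_and, if_pos hC, hv]
          · rw [getD_set_ne ans j m v hmj]
            by_cases hm1 : m ∈ linkChain nums j1 ∧
                (i' = nums.length ∨ nums.getD m 0 < nums.getD i' 0)
            · rw [if_pos hm1, if_pos ⟨List.mem_cons_of_mem _ hm1.1, hm1.2⟩]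
            · rw [if_neg hm1, if_neg ?_]
              intro ⟨hmem, hcond⟩
              rcases List.mem_cons.mp hmem with h | h
              · exact hmj h
              · exact hm1 ⟨h, hcond⟩
        · rcases hstack with ⟨hs, hall⟩ | ⟨t', hs, htmem, htC, htall⟩
          · left
            refine ⟨hs, ?_⟩
            intro t ht
            rw [hchain] at ht
            rcases List.mem_cons.mp ht with rfl | ht
            · exact hC
            · exact hall t ht
          · right
            refine ⟨t', hs, hsub t' htmem, htC, ?_⟩
            intro t ht htlt
            rw [hchain] at ht
            rcases List.mem_cons.mp ht with rfl | ht
            · exact hC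
            · exact htall t ht htlt
    · -- j survives: nothing pops
      refine ⟨linkChain nums j, ans, ?_, hlen, ?_, ?_⟩
      · rw [linkChain]
        simp only [popA, if_neg hC]
      · intro m
        rw [if_neg ?_]
        intro ⟨hmem, hcond⟩
        rcases hcond with rfl | hcond
        · exact hC (Or.inl rfl)
        · have := chain_val_mono nums j m hmem
          have : nums.getD j 0 < nums.getD i' 0 := by omega
          exact hC (Or.inr this)
      · right
        refine ⟨j, rfl, hjmem, hC, ?_⟩
        intro t ht htlt
        have := chain_mem_le nums j t ht
        omega

def stepA (nums : List Int) (st : List Nat × List Int) (i : Nat) : List Nat × List Int :=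
  (i :: (popA nums i st.1 st.2).1, (popA nums i st.1 st.2).2)

theorem portA_eq_foldl (nums : List Int) :
    maximumLengthOfRanges nums =
      ((List.range (nums.length + 1)).foldl (stepA nums)
        ([], List.replicate nums.length 0)).2 := by
  rfl

theorem main_inv (nums : List Int) : ∀ i : Nat, i < nums.length →
    ∃ ans : List Int,
      (List.range (i + 1)).foldl (stepA nums) ([], List.replicate nums.length 0) =
        (linkChain nums i, ans) ∧
      ans.length = nums.length ∧
      ∀ m : Nat, ans.getD m 0 =
        if rscanB nums (nums.getD m 0) (m + 1) ≤ i ∧ m < nums.length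
        then outV nums m else 0 := by
  intro i
  induction i with
  | zero =>
    intro h0
    refine ⟨List.replicate nums.length 0, ?_, by simp, ?_⟩
    · have : linkChain nums 0 = [0] := by
        rw [linkChain]; simp [lscanB]
      rw [this]
      simp [stepA, popA]
    · intro m
      rw [getD_replicate]
      rw [if_neg ?_]
      intro ⟨hR, hm⟩
      have := (rscan_spec nums (nums.getD m 0) (m + 1) (by omega)).1
      omega
  | succ i ihi =>
    intro hi1
    obtain ⟨ans, hfold, hlen, hans⟩ := ihi (by omega)
    have Hmem : ∀ t ∈ linkChain nums i, t < i + 1 ∧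
        ∀ k : Nat, t < k → k < i + 1 → nums.getD k 0 ≤ nums.getD t 0 := by
      intro t ht
      have h1 := chain_mem_le nums i t ht
      exact ⟨by omega, fun k hk1 hk2 => chain_prop nums i t ht k hk1 (by omega)⟩
    obtain ⟨s', ans', hpop, hlen', hans', hstack⟩ :=
      pop_run nums (i + 1) (by omega) i ans hlen Hmem
    refine ⟨ans', ?_, hlen', ?_⟩
    · rw [List.range_succ, List.foldl_append, hfold]
      simp only [List.foldl_cons, List.foldl_nil, stepA, hpop]
      congr 1
      -- (i+1) :: s' = linkChain nums (i+1)
      set x := nums.getD (i + 1) 0 with hxdef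
      rcases hstack with ⟨hs, hall⟩ | ⟨t', hs, htmem, htC, htall⟩
      · -- everything popped: no element ≥ x to the left
        have hneg : lscanB nums x (i + 1) = -1 := by
          apply lscan_eq_neg
          intro k hk
          have hpoplt : ∀ t ∈ linkChain nums i, (-1 : Int) < (t : Int) → nums.getD t 0 < x := by
            intro t ht _
            rcases hall t ht with h | h
            · omega
            · exact h
          exact gap_lt nums i x (-1) hpoplt i k (by omega) (by omega) (by omega)
        rw [linkChain]
        rw [dif_pos hneg, hs]
      · have hxt : x ≤ nums.getD t' 0 := by
          rcases not_or.mp htC with ⟨h1, h2⟩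
          omega
        have ht'i : t' ≤ i := chain_mem_le nums i t' htmem
        have heq : lscanB nums x (i + 1) = (t' : Int) := by
          apply lscan_eq nums x (i + 1) t' (by omega) hxt
          intro k hk1 hk2
          have hpoplt : ∀ t ∈ linkChain nums i, ((t' : Int)) < (t : Int) → nums.getD t 0 < x := by
            intro t ht hlt
            rcases htall t ht (by omega) with h | h
            · omega
            · exact h
          exact gap_lt nums i x (t' : Int) hpoplt i k (by omega) (by omega) (by omega)
        rw [linkChain]
        rw [dif_neg (by rw [heq]; omega), heq, hs]
        simp
    · intro m
      rw [hans' m]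
      by_cases hmem : m ∈ linkChain nums i ∧
          (i + 1 = nums.length ∨ nums.getD m 0 < nums.getD (i + 1) 0)
      · rw [if_pos hmem]
        have hmi : m ≤ i := chain_mem_le nums i m hmem.1
        have hR : rscanB nums (nums.getD m 0) (m + 1) = i + 1 :=
          rscan_eq nums (nums.getD m 0) (m + 1) (i + 1) (by omega) (by omega)
            (fun k hk1 hk2 => chain_prop nums i m hmem.1 k (by omega) (by omega)) hmem.2
        rw [if_pos ⟨by omega, by omega⟩]
      · rw [if_neg hmem, hans m]
        by_cases hold : rscanB nums (nums.getD m 0) (m + 1) ≤ i ∧ m < nums.length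
        · rw [if_pos hold, if_pos ⟨by omega, hold.2⟩]
        · rw [if_neg hold, if_neg ?_]
          intro ⟨hR1, hm1⟩
          have hRe : rscanB nums (nums.getD m 0) (m + 1) = i + 1 := by omega
          obtain ⟨q1, q2, q3, q4⟩ := rscan_spec nums (nums.getD m 0) (m + 1) (by omega)
          have hmi : m ≤ i := by omega
          have hcond : i + 1 = nums.length ∨ nums.getD m 0 < nums.getD (i + 1) 0 := by
            rw [hRe] at q4
            rcases q4 with h | h
            · exact Or.inl h
            · exact Or.inr h
          exact hmem ⟨chain_mem_of nums i m hmi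
            (fun k hk1 hk2 => q3 k (by omega) (by omega)), hcond⟩

theorem ports_agree (nums : List Int) :
    maximumLengthOfRanges nums = maximumLengthOfRanges_alt nums := by
  by_cases hn : nums.length = 0
  · rw [List.length_eq_zero_iff] at hn
    subst hn
    rfl
  · set n := nums.length with hndef
    obtain ⟨ans, hfold, hlen, hans⟩ := main_inv nums (n - 1) (by omega)
    have Hmem : ∀ t ∈ linkChain nums (n - 1), t < n ∧
        ∀ k : Nat, t < k → k < n → nums.getD k 0 ≤ nums.getD t 0 := by
      intro t ht
      have h1 := chain_mem_le nums (n - 1) t ht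
      exact ⟨by omega, fun k hk1 hk2 => chain_prop nums (n - 1) t ht k hk1 (by omega)⟩
    obtain ⟨s', ans', hpop, hlen', hans', _⟩ :=
      pop_run nums n (le_refl _) (n - 1) ans hlen Hmem
    have hAn : maximumLengthOfRanges nums = ans' := by
      rw [portA_eq_foldl]
      have hrange : n - 1 + 1 = n := by omega
      rw [hrange] at hfold
      rw [show n + 1 = (n - 1 + 1) + 1 by omega, List.range_succ, List.foldl_append,
        hrange, hfold]
      simp only [List.foldl_cons, List.foldl_nil, stepA, hpop]
    have hfinal : ∀ m : Nat, m < n → ans'.getD m 0 = outV nums m := by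
      intro m hm
      rw [hans' m]
      by_cases hmem : m ∈ linkChain nums (n - 1)
      · rw [if_pos ⟨hmem, Or.inl rfl⟩]
      · rw [if_neg (fun h => hmem h.1), hans m]
        obtain ⟨q1, q2, q3, q4⟩ := rscan_spec nums (nums.getD m 0) (m + 1) (by omega)
        have hRlt : rscanB nums (nums.getD m 0) (m + 1) ≤ n - 1 := by
          by_contra hcon
          have hRe : rscanB nums (nums.getD m 0) (m + 1) = n := by omega
          exact hmem (chain_mem_of nums (n - 1) m (by omega)
            (fun k hk1 hk2 => q3 k (by omega) (by omega)))
        rw [if_pos ⟨hRlt, hm⟩]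
    rw [hAn]
    apply List.ext_getElem
    · simp [maximumLengthOfRanges_alt, hlen']
    · intro m h1 h2
      have hmn : m < n := by omega
      have : ans'[m] = ans'.getD m 0 := (List.getD_eq_getElem ans' 0 h1).symm
      rw [this, hfinal m hmn]
      simp [maximumLengthOfRanges_alt, outV]

-- ===== VERDICT (by name: the statement is the Claim_ definition above) =====
theorem maximumLengthOfRanges_spec : Claim_equal_maximumLengthOfRanges := by
  intro nums _
  unfold Spec_maximumLengthOfRanges
  exact ports_agree nums
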